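-- pv_equiv track=rewrite | github.com/LukaLavs/Algorithms | Edit-distance.py | reconstruct_operations
-- ===== SOURCE A (Python) =====
-- def reconstruct_operations(D, str1, str2):
--     """
--     Reconstructs the sequence of operations (insert, delete, replace)
--     that transforms str1 into str2 based on the filled distance matrix D.
--     """
--     i, j = len(str1), len(str2)
--     operations = []
--
--     while i > 0 or j > 0:
--         if i > 0 and j > 0 and (str1[i - 1] == str2[j - 1] or D[i][j] == D[i - 1][j - 1] + 1):
--             if str1[i - 1] != str2[j - 1]:
--                 operations.append(f"Replace {str1[i - 1]} with {str2[j - 1]}")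
--             i -= 1
--             j -= 1
--         elif i > 0 and D[i][j] == D[i - 1][j] + 1:
--             operations.append(f"Delete {str1[i - 1]}")
--             i -= 1
--         else:
--             operations.append(f"Insert {str2[j - 1]}")
--             j -= 1
--
--     operations.reverse()  # Reverse the operations to show them in the correct order
--     return operations
-- ===== SOURCE B (Python) =====
-- def reconstruct_operations(D, str1, str2):
--     # Defunctionalized post-order recursion: an explicit frame stack holds
--     # "call" frames (choose the edit-path edge at (i, j)) and emit frames
--     # ("R"/"D"/"I": render one operation after its subproblem has finished),
--     # so the operations are emitted already in forward order and no
--     # reverse() pass exists.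
--     out = []
--     stack = [("call", len(str1), len(str2))]
--     while stack:
--         tag, i, j = stack.pop()
--         if tag == "call":
--             if i == 0 and j == 0:
--                 continue
--             if i > 0 and j > 0 and (str1[i - 1] == str2[j - 1] or D[i][j] == D[i - 1][j - 1] + 1):
--                 stack.append(("R", i, j))
--                 stack.append(("call", i - 1, j - 1))
--             elif i > 0 and D[i][j] == D[i - 1][j] + 1:
--                 stack.append(("D", i, j))
--                 stack.append(("call", i - 1, j))
--             else:
--                 stack.append(("I", i, j))
--                 stack.append(("call", i, j - 1))
--         elif tag == "R":
--             if str1[i - 1] != str2[j - 1]: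
--                 out.append(f"Replace {str1[i - 1]} with {str2[j - 1]}")
--         elif tag == "D":
--             out.append(f"Delete {str1[i - 1]}")
--         else:
--             out.append(f"Insert {str2[j - 1]}")
--     return out
-- ===== Notes on version B (the rewrite author's own statement) =====
-- stated objective: alternative
-- what changed: B replaces A's while-loop, which appends operation strings in reverse order and calls reverse() at the end, by a defunctionalized post-order recursion: an explicit frame stack of 'call' frames (choose the edit-path edge) and emit frames (render one operation after its subproblem finished), so operations are emitted already in forward order and the reversal pass disappears.
-- outside the precondition, e.g. on reconstruct_operations([[0, 1], [1, 0]], 'ab', 'b'): A returns ['Delete a'], B returns ['Delete a']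
import Mathlib
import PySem

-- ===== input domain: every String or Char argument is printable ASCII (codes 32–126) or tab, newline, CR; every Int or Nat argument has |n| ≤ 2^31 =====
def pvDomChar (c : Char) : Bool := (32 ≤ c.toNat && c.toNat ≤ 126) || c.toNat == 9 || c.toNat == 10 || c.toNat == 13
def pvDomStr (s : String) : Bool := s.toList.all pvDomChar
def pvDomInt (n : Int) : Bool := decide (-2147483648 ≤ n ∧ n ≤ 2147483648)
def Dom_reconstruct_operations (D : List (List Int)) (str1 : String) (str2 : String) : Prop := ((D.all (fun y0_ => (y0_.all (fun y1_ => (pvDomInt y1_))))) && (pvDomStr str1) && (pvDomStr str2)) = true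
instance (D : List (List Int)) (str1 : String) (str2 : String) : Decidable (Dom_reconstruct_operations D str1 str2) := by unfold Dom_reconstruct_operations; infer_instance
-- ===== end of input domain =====

-- B replaces A's iterative backtrack (append in reverse order, then reverse()) by a
-- defunctionalized post-order recursion: an explicit frame stack of "call" and emit frames,
-- which emits each operation AFTER its subproblem, already in forward order, with no reverse.
-- Both Pythons contain the very same branch conditions, so the two ports share the condition
-- helpers pvCond1/pvCond2 (short-circuit order exactly as in Python; none = an index raised).

-- `i > 0 and j > 0 and (str1[i-1] == str2[j-1] or D[i][j] == D[i-1][j-1] + 1)`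
def pvCond1 (D : List (List Int)) (s1 s2 : List Char) (i j : Int) : Option Bool :=
  if 0 < i ∧ 0 < j then
    match PySem.List.pyGet? s1 (i - 1) with
    | none => none
    | some c1 =>
      match PySem.List.pyGet? s2 (j - 1) with
      | none => none
      | some c2 =>
        if c1 = c2 then some true
        else
          match PySem.List.pyGet? D i with
          | none => none
          | some row =>
            match PySem.List.pyGet? row j with
            | none => none
            | some v =>
              match PySem.List.pyGet? D (i - 1) with
              | none => none
              | some prow =>
                match PySem.List.pyGet? prow (j - 1) with
                | none => none
                | some pv => some (decide (v = pv + 1))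
  else some false

-- `i > 0 and D[i][j] == D[i-1][j] + 1`
def pvCond2 (D : List (List Int)) (i j : Int) : Option Bool :=
  if 0 < i then
    match PySem.List.pyGet? D i with
    | none => none
    | some row =>
      match PySem.List.pyGet? row j with
      | none => none
      | some v =>
        match PySem.List.pyGet? D (i - 1) with
        | none => none
        | some prow =>
          match PySem.List.pyGet? prow j with
          | none => none
          | some pv => some (decide (v = pv + 1))
  else some false

-- ===== PORT A =====
-- A's while loop; the accumulator grows at the end exactly like Python's list.append, and the
-- result is reversed on exit.  Fuel only makes the loop total; on the admitted inputs it never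
-- runs out.  Where Python raises (an index error) the returned value is irrelevant.
def pvALoop (D : List (List Int)) (s1 s2 : List Char) : Nat → Int → Int → List String → List String
  | 0, _, _, ops => ops.reverse
  | fuel + 1, i, j, ops =>
    if 0 < i ∨ 0 < j then
      match pvCond1 D s1 s2 i j with
      | none => ops.reverse
      | some true =>
        match PySem.List.pyGet? s1 (i - 1), PySem.List.pyGet? s2 (j - 1) with
        | some c1, some c2 =>
          if c1 ≠ c2 then
            pvALoop D s1 s2 fuel (i - 1) (j - 1)
              (ops ++ ["Replace " ++ c1.toString ++ " with " ++ c2.toString])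
          else pvALoop D s1 s2 fuel (i - 1) (j - 1) ops
        | _, _ => ops.reverse
      | some false =>
        match pvCond2 D i j with
        | none => ops.reverse
        | some true =>
          match PySem.List.pyGet? s1 (i - 1) with
          | some c1 => pvALoop D s1 s2 fuel (i - 1) j (ops ++ ["Delete " ++ c1.toString])
          | none => ops.reverse
        | some false =>
          match PySem.List.pyGet? s2 (j - 1) with
          | some c2 => pvALoop D s1 s2 fuel i (j - 1) (ops ++ ["Insert " ++ c2.toString])
          | none => ops.reverse
    else ops.reverse

def reconstruct_operations (D : List (List Int)) (str1 : String) (str2 : String) : List String :=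
  pvALoop D str1.toList str2.toList
    (str1.toList.length + 2 * str2.toList.length + 3 + D.foldl (fun a r => a + r.length) 0)
    (str1.toList.length : Int) (str2.toList.length : Int) []

-- ===== PORT B =====
-- B's frame-stack machine (defunctionalized post-order recursion): a "call" frame chooses the
-- edit-path edge at (i, j) and pushes its sub-"call" below an emit frame ("R"/"D"/"I"); an emit
-- frame renders one operation AFTER its subproblem has finished, so `out` grows already in
-- forward order.  Each Python iteration pops one frame = consumes one unit of fuel; the fuel
-- only makes the loop total (on admitted inputs it never runs out); none = Python raised.
def pvBMach (D : List (List Int)) (s1 s2 : List Char) :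
    Nat → List (String × Int × Int) → List String → Option (List String)
  | 0, _, _ => none
  | _ + 1, [], out => some out
  | fuel + 1, (tag, i, j) :: stack, out =>
    if tag = "call" then
      if i = 0 ∧ j = 0 then pvBMach D s1 s2 fuel stack out
      else
        match pvCond1 D s1 s2 i j with
        | none => none
        | some true => pvBMach D s1 s2 fuel (("call", i - 1, j - 1) :: ("R", i, j) :: stack) out
        | some false =>
          match pvCond2 D i j with
          | none => none
          | some true => pvBMach D s1 s2 fuel (("call", i - 1, j) :: ("D", i, j) :: stack) out
          | some false => pvBMach D s1 s2 fuel (("call", i, j - 1) :: ("I", i, j) :: stack) out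
    else if tag = "R" then
      match PySem.List.pyGet? s1 (i - 1), PySem.List.pyGet? s2 (j - 1) with
      | some c1, some c2 =>
        pvBMach D s1 s2 fuel stack
          (if c1 ≠ c2 then out ++ ["Replace " ++ c1.toString ++ " with " ++ c2.toString] else out)
      | _, _ => none
    else if tag = "D" then
      match PySem.List.pyGet? s1 (i - 1) with
      | some c1 => pvBMach D s1 s2 fuel stack (out ++ ["Delete " ++ c1.toString])
      | none => none
    else
      match PySem.List.pyGet? s2 (j - 1) with
      | some c2 => pvBMach D s1 s2 fuel stack (out ++ ["Insert " ++ c2.toString])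
      | none => none

def reconstruct_operations_alt (D : List (List Int)) (str1 : String) (str2 : String) : List String :=
  match pvBMach D str1.toList str2.toList
      (2 * (str1.toList.length + str2.toList.length) + 2)
      [("call", (str1.toList.length : Int), (str2.toList.length : Int))] [] with
  | none => []
  | some out => out

-- ===== PRECONDITION & SPEC =====
-- Pre_ admits the inputs on which A's backtrack provably never leaves the matrix: str1 empty or
-- str1 = str2 (the walk never reads D at all), or D shaped like (and border-consistent with) a
-- filled (len(str1)+1) × (len(str2)+1) distance matrix.  Outside it A's backtrack can run off
-- the matrix, wrap negative indexes and typically raises IndexError (occasionally it still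
-- returns an accidental value, see the cite).
def Pre_reconstruct_operations (D : List (List Int)) (str1 : String) (str2 : String) : Prop :=
  str1 = "" ∨ str1 = str2 ∨
  (str1.toList.length + 1 ≤ D.length ∧
   (∀ r ∈ D, str2.toList.length + 1 ≤ r.length) ∧
   (∀ t : Nat, t < str1.toList.length →
     (D.getD (t + 1) []).headD 0 = (D.getD t []).headD 0 + 1))

instance (D : List (List Int)) (str1 : String) (str2 : String) :
    Decidable (Pre_reconstruct_operations D str1 str2) := by
  unfold Pre_reconstruct_operations; infer_instance

def pvWitness_reconstruct_operations : List (List Int) × String × String :=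
  ([[0, 1], [1, 1]], "a", "b")

def Spec_reconstruct_operations (D : List (List Int)) (str1 : String) (str2 : String) (out : List String) : Prop := out = reconstruct_operations_alt D str1 str2
instance (D : List (List Int)) (str1 : String) (str2 : String) (out : List String) : Decidable (Spec_reconstruct_operations D str1 str2 out) := by unfold Spec_reconstruct_operations; infer_instance

-- ===== CLAIM (what is proved, stated in full; the proofs are below) =====
def Claim_equal_reconstruct_operations : Prop := ∀ (D : List (List Int)) (str1 : String) (str2 : String), Dom_reconstruct_operations D str1 str2 → Pre_reconstruct_operations D str1 str2 → Spec_reconstruct_operations D str1 str2 (reconstruct_operations D str1 str2)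

-- ===== LEMMAS AND PROOFS =====

theorem pvHeadD_eq (l : List Int) (h : 0 < l.length) : l.headD 0 = l[0] := by
  cases l with
  | nil => simp at h
  | cons a t => rfl

-- one common finishing step: from a one-step unfolding of each port and the induction
-- hypothesis at the successor state, produce the invariant at the current state.
-- On the B side 'c' counts exactly the frames the machine pops while finishing the
-- "call" frame for (i, j); processing it turns fuel f + c into fuel f with R appended.
theorem pvFinish (D : List (List Int)) (s1 s2 : List Char) (i j i' j' : Nat)
    (t : String) (chunk R' : List String) (c' : Nat)
    (hrev : chunk.reverse = chunk)
    (hAstep : ∀ (f : Nat) (ops : List String), pvALoop D s1 s2 (f + 1) (i : Int) (j : Int) ops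
        = pvALoop D s1 s2 f (i' : Int) (j' : Int) (ops ++ chunk))
    (hBstep : ∀ (g : Nat) (stack : List (String × Int × Int)) (out : List String),
        pvBMach D s1 s2 (g + 1) (("call", (i : Int), (j : Int)) :: stack) out
          = pvBMach D s1 s2 g
              (("call", (i' : Int), (j' : Int)) :: (t, (i : Int), (j : Int)) :: stack) out)
    (hBemit : ∀ (g : Nat) (stack : List (String × Int × Int)) (out : List String),
        pvBMach D s1 s2 (g + 1) ((t, (i : Int), (j : Int)) :: stack) out
          = pvBMach D s1 s2 g stack (out ++ chunk))
    (hstep : i' + j' + 1 ≤ i + j)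
    (hA' : ∀ fA : Nat, i' + j' + 1 ≤ fA → ∀ ops,
        pvALoop D s1 s2 fA (i' : Int) (j' : Int) ops = R' ++ ops.reverse)
    (hc' : c' ≤ 2 * (i' + j') + 1)
    (hB' : ∀ (f : Nat) (stack : List (String × Int × Int)) (out : List String),
        pvBMach D s1 s2 (f + c') (("call", (i' : Int), (j' : Int)) :: stack) out
          = pvBMach D s1 s2 f stack (out ++ R')) :
    ∃ (R : List String) (c : Nat), c ≤ 2 * (i + j) + 1 ∧
      (∀ fA : Nat, i + j + 1 ≤ fA → ∀ ops,
        pvALoop D s1 s2 fA (i : Int) (j : Int) ops = R ++ ops.reverse) ∧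
      (∀ (f : Nat) (stack : List (String × Int × Int)) (out : List String),
        pvBMach D s1 s2 (f + c) (("call", (i : Int), (j : Int)) :: stack) out
          = pvBMach D s1 s2 f stack (out ++ R)) := by
  refine ⟨R' ++ chunk, c' + 2, by omega, ?_, ?_⟩
  · intro fA hfA ops
    cases fA with
    | zero => omega
    | succ f =>
      rw [hAstep, hA' f (by omega)]
      simp [List.reverse_append, hrev, List.append_assoc]
  · intro f stack out
    have e : f + (c' + 2) = (f + 1 + c') + 1 := by omega
    rw [e, hBstep, hB' (f + 1), hBemit, List.append_assoc]

-- the invariant at the terminal state (0, 0): nothing is emitted, one frame is popped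
theorem pvZero (D : List (List Int)) (s1 s2 : List Char) :
    ∃ (R : List String) (c : Nat), c ≤ 2 * (0 + 0) + 1 ∧
      (∀ fA : Nat, 0 + 0 + 1 ≤ fA → ∀ ops,
        pvALoop D s1 s2 fA ((0 : Nat) : Int) ((0 : Nat) : Int) ops = R ++ ops.reverse) ∧
      (∀ (f : Nat) (stack : List (String × Int × Int)) (out : List String),
        pvBMach D s1 s2 (f + c) (("call", ((0 : Nat) : Int), ((0 : Nat) : Int)) :: stack) out
          = pvBMach D s1 s2 f stack (out ++ R)) := by
  refine ⟨[], 1, by omega, ?_, ?_⟩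
  · intro fA hfA ops
    cases fA with
    | zero => omega
    | succ f => simp [pvALoop]
  · intro f stack out
    simp [pvBMach]

theorem pvMain (D : List (List Int)) (s1 s2 : List Char)
    (hD : s1.length + 1 ≤ D.length)
    (hrow : ∀ r ∈ D, s2.length + 1 ≤ r.length)
    (hcol : ∀ t : Nat, t < s1.length →
      (D.getD (t + 1) []).headD 0 = (D.getD t []).headD 0 + 1) :
    ∀ (k i j : Nat), i + j ≤ k → i ≤ s1.length → j ≤ s2.length →
    ∃ (R : List String) (c : Nat), c ≤ 2 * (i + j) + 1 ∧
      (∀ fA : Nat, i + j + 1 ≤ fA → ∀ ops,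
        pvALoop D s1 s2 fA (i : Int) (j : Int) ops = R ++ ops.reverse) ∧
      (∀ (f : Nat) (stack : List (String × Int × Int)) (out : List String),
        pvBMach D s1 s2 (f + c) (("call", (i : Int), (j : Int)) :: stack) out
          = pvBMach D s1 s2 f stack (out ++ R)) := by
  intro k
  induction k with
  | zero =>
    intro i j hk hi hj
    obtain ⟨rfl, rfl⟩ : i = 0 ∧ j = 0 := by omega
    exact pvZero D s1 s2
  | succ k ih =>
    intro i j hk hi hj
    by_cases hi0 : 0 < i
    · have hIi : (0 : Int) < (i : Int) := by exact_mod_cast hi0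
      have hine : i ≠ 0 := by omega
      have hnz : ¬(((i : Nat) : Int) = 0 ∧ ((j : Nat) : Int) = 0) := by omega
      have hi1 : i - 1 < s1.length := by omega
      have ei : ((i : Int) - 1) = ((i - 1 : Nat) : Int) := by omega
      have hc1 : PySem.List.pyGet? s1 ((i : Int) - 1) = some s1[i - 1] := by
        rw [ei, PySem.List.pyGet?_natCast, List.getElem?_eq_getElem hi1]
      have hg1 : s1[i - 1]? = some s1[i - 1] := List.getElem?_eq_getElem hi1
      have hiD : i < D.length := by omega
      have hiD1 : i - 1 < D.length := by omega
      have hrowi : PySem.List.pyGet? D (i : Int) = some D[i] := by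
        rw [PySem.List.pyGet?_natCast, List.getElem?_eq_getElem hiD]
      have hrowi1 : PySem.List.pyGet? D ((i : Int) - 1) = some D[i - 1] := by
        rw [ei, PySem.List.pyGet?_natCast, List.getElem?_eq_getElem hiD1]
      have hleni : s2.length + 1 ≤ D[i].length := hrow _ (List.getElem_mem hiD)
      have hleni1 : s2.length + 1 ≤ D[i - 1].length := hrow _ (List.getElem_mem hiD1)
      by_cases hj0 : 0 < j
      · have hIj : (0 : Int) < (j : Int) := by exact_mod_cast hj0
        have hjne : j ≠ 0 := by omega
        have hj1 : j - 1 < s2.length := by omega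
        have ej : ((j : Int) - 1) = ((j - 1 : Nat) : Int) := by omega
        have hc2 : PySem.List.pyGet? s2 ((j : Int) - 1) = some s2[j - 1] := by
          rw [ej, PySem.List.pyGet?_natCast, List.getElem?_eq_getElem hj1]
        have hg2 : s2[j - 1]? = some s2[j - 1] := List.getElem?_eq_getElem hj1
        have hjri : j < D[i].length := by omega
        have hjri1 : j < D[i - 1].length := by omega
        have hj1ri1 : j - 1 < D[i - 1].length := by omega
        have hvij : PySem.List.pyGet? D[i] (j : Int) = some (D[i][j]) := by
          rw [PySem.List.pyGet?_natCast, List.getElem?_eq_getElem hjri]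
        have hvi1j : PySem.List.pyGet? D[i - 1] (j : Int) = some (D[i - 1][j]) := by
          rw [PySem.List.pyGet?_natCast, List.getElem?_eq_getElem hjri1]
        have hvi1j1 : PySem.List.pyGet? D[i - 1] ((j : Int) - 1) = some (D[i - 1][j - 1]) := by
          rw [ej, PySem.List.pyGet?_natCast, List.getElem?_eq_getElem hj1ri1]
        obtain ⟨Ra, ca, hclea, hAa, hBa⟩ := ih (i - 1) (j - 1) (by omega) (by omega) (by omega)
        obtain ⟨Rb, cb, hcleb, hAb, hBb⟩ := ih (i - 1) j (by omega) (by omega) (by omega)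
        obtain ⟨Rc, cc, hclec, hAc, hBc⟩ := ih i (j - 1) (by omega) (by omega) (by omega)
        by_cases hch : s1[i - 1] = s2[j - 1]
        · have hcond1 : pvCond1 D s1 s2 (i : Int) (j : Int) = some true := by
            simp [pvCond1, hi0, hj0, hc1, hc2, hch]
          refine pvFinish D s1 s2 i j (i - 1) (j - 1) "R" [] Ra ca
            rfl ?_ ?_ ?_ (by omega) hAa hclea hBa
          · intro f ops
            simp only [pvALoop]
            split_ifs with hifc
            · rw [hcond1]
              simp [hc1, hc2, hg1, hg2, hch, ei, ej]
            · omega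
          · intro g stack out
            simp only [pvBMach]
            rw [if_pos trivial, if_neg hnz, hcond1, ei, ej]
          · intro g stack out
            simp [pvBMach, hc1, hc2, hch]
        · by_cases hd : D[i][j] = D[i - 1][j - 1] + 1
          · have hcond1 : pvCond1 D s1 s2 (i : Int) (j : Int) = some true := by
              simp [pvCond1, hi0, hj0, hc1, hc2, hch, hrowi, hrowi1, hvij, hvi1j1, hd]
            refine pvFinish D s1 s2 i j (i - 1) (j - 1) "R"
              ["Replace " ++ (s1[i - 1]).toString ++ " with " ++ (s2[j - 1]).toString] Ra ca
              rfl ?_ ?_ ?_ (by omega) hAa hclea hBa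
            · intro f ops
              simp only [pvALoop]
              split_ifs with hifc
              · rw [hcond1]
                simp [hc1, hc2, hg1, hg2, hch, ei, ej]
              · omega
            · intro g stack out
              simp only [pvBMach]
              rw [if_pos trivial, if_neg hnz, hcond1, ei, ej]
            · intro g stack out
              simp [pvBMach, hc1, hc2, hch]
          · have hcond1 : pvCond1 D s1 s2 (i : Int) (j : Int) = some false := by
              simp [pvCond1, hi0, hj0, hc1, hc2, hch, hrowi, hrowi1, hvij, hvi1j1, hd]
            by_cases hd2 : D[i][j] = D[i - 1][j] + 1
            · have hcond2 : pvCond2 D (i : Int) (j : Int) = some true := by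
                simp [pvCond2, hi0, hrowi, hrowi1, hvij, hvi1j, hd2]
              refine pvFinish D s1 s2 i j (i - 1) j "D"
                ["Delete " ++ (s1[i - 1]).toString] Rb cb
                rfl ?_ ?_ ?_ (by omega) hAb hcleb hBb
              · intro f ops
                simp only [pvALoop]
                split_ifs with hifc
                · rw [hcond1, hcond2]
                  simp [hc1, hg1, ei]
                · omega
              · intro g stack out
                simp only [pvBMach]
                rw [if_pos trivial, if_neg hnz, hcond1, hcond2, ei]
              · intro g stack out
                simp [pvBMach, hc1]
            · have hcond2 : pvCond2 D (i : Int) (j : Int) = some false := by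
                simp [pvCond2, hi0, hrowi, hrowi1, hvij, hvi1j, hd2]
              refine pvFinish D s1 s2 i j i (j - 1) "I"
                ["Insert " ++ (s2[j - 1]).toString] Rc cc
                rfl ?_ ?_ ?_ (by omega) hAc hclec hBc
              · intro f ops
                simp only [pvALoop]
                split_ifs with hifc
                · rw [hcond1, hcond2]
                  simp [hc2, hg2, ej]
                · omega
              · intro g stack out
                simp only [pvBMach]
                rw [if_pos trivial, if_neg hnz, hcond1, hcond2, ej]
              · intro g stack out
                simp [pvBMach, hc2]
      · obtain rfl : j = 0 := by omega
        -- j = 0, i > 0: the first-column border makes the Delete branch fire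
        have h0ri : 0 < D[i].length := by omega
        have h0ri1 : 0 < D[i - 1].length := by omega
        have hvi0 : PySem.List.pyGet? D[i] (0 : Int) = some (D[i][0]) := by
          rw [PySem.List.pyGet?_zero, List.getElem?_eq_getElem h0ri]
        have hvi10 : PySem.List.pyGet? D[i - 1] (0 : Int) = some (D[i - 1][0]) := by
          rw [PySem.List.pyGet?_zero, List.getElem?_eq_getElem h0ri1]
        have hv : D[i][0] = D[i - 1][0] + 1 := by
          have h := hcol (i - 1) (by omega)
          have e : i - 1 + 1 = i := by omega
          rw [e, List.getD_eq_getElem _ _ hiD, List.getD_eq_getElem _ _ hiD1,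
            pvHeadD_eq _ h0ri, pvHeadD_eq _ h0ri1] at h
          exact h
        have hcond1 : pvCond1 D s1 s2 (i : Int) ((0 : Nat) : Int) = some false := by
          simp [pvCond1]
        have hcond2 : pvCond2 D (i : Int) ((0 : Nat) : Int) = some true := by
          simp [pvCond2, hi0, hrowi, hrowi1, hvi0, hvi10, hv]
        obtain ⟨Rb, cb, hcleb, hAb, hBb⟩ := ih (i - 1) 0 (by omega) (by omega) (by omega)
        refine pvFinish D s1 s2 i 0 (i - 1) 0 "D"
          ["Delete " ++ (s1[i - 1]).toString] Rb cb
          rfl ?_ ?_ ?_ (by omega) hAb hcleb hBb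
        · intro f ops
          simp only [pvALoop]
          split_ifs with hifc
          · rw [hcond1, hcond2]
            simp [hc1, hg1, ei]
          · omega
        · intro g stack out
          simp only [pvBMach]
          rw [if_pos trivial, if_neg hnz, hcond1, hcond2, ei]
        · intro g stack out
          simp [pvBMach, hc1]
    · obtain rfl : i = 0 := by omega
      by_cases hj0 : 0 < j
      · -- i = 0, j > 0: the Insert branch fires
        have hIj : (0 : Int) < (j : Int) := by exact_mod_cast hj0
        have hjne : j ≠ 0 := by omega
        have hnz : ¬(((0 : Nat) : Int) = 0 ∧ ((j : Nat) : Int) = 0) := by omega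
        have hj1 : j - 1 < s2.length := by omega
        have ej : ((j : Int) - 1) = ((j - 1 : Nat) : Int) := by omega
        have hc2 : PySem.List.pyGet? s2 ((j : Int) - 1) = some s2[j - 1] := by
          rw [ej, PySem.List.pyGet?_natCast, List.getElem?_eq_getElem hj1]
        have hg2 : s2[j - 1]? = some s2[j - 1] := List.getElem?_eq_getElem hj1
        have hcond1 : pvCond1 D s1 s2 ((0 : Nat) : Int) (j : Int) = some false := by
          simp [pvCond1]
        have hcond2 : pvCond2 D ((0 : Nat) : Int) (j : Int) = some false := by
          simp [pvCond2]
        obtain ⟨Rc, cc, hclec, hAc, hBc⟩ := ih 0 (j - 1) (by omega) (by omega) (by omega)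
        refine pvFinish D s1 s2 0 j 0 (j - 1) "I"
          ["Insert " ++ (s2[j - 1]).toString] Rc cc
          rfl ?_ ?_ ?_ (by omega) hAc hclec hBc
        · intro f ops
          simp only [pvALoop]
          split_ifs with hifc
          · rw [hcond1, hcond2]
            simp [hc2, hg2, ej]
          · omega
        · intro g stack out
          simp only [pvBMach]
          rw [if_pos trivial, if_neg hnz, hcond1, hcond2, ej]
        · intro g stack out
          simp [pvBMach, hc2]
      · obtain rfl : j = 0 := by omega
        exact pvZero D s1 s2

-- when str1 is empty the walk only ever takes the Insert branch and never reads D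
theorem pvInsertOnly (D : List (List Int)) (s1 s2 : List Char) :
    ∀ (j : Nat), j ≤ s2.length →
    ∃ (R : List String) (c : Nat), c ≤ 2 * (0 + j) + 1 ∧
      (∀ fA : Nat, 0 + j + 1 ≤ fA → ∀ ops,
        pvALoop D s1 s2 fA ((0 : Nat) : Int) (j : Int) ops = R ++ ops.reverse) ∧
      (∀ (f : Nat) (stack : List (String × Int × Int)) (out : List String),
        pvBMach D s1 s2 (f + c) (("call", ((0 : Nat) : Int), (j : Int)) :: stack) out
          = pvBMach D s1 s2 f stack (out ++ R)) := by
  intro j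
  induction j with
  | zero =>
    intro _
    exact pvZero D s1 s2
  | succ j ihj =>
    intro hj
    have hj1 : j < s2.length := by omega
    have ej : (((j + 1 : Nat)) : Int) - 1 = ((j : Nat) : Int) := by omega
    have hnz : ¬(((0 : Nat) : Int) = 0 ∧ (((j + 1 : Nat)) : Int) = 0) := by omega
    have hc2 : PySem.List.pyGet? s2 ((((j + 1) : Nat) : Int) - 1) = some s2[j] := by
      rw [ej, PySem.List.pyGet?_natCast, List.getElem?_eq_getElem hj1]
    have hg2 : s2[j]? = some s2[j] := List.getElem?_eq_getElem hj1
    have hcond1 : pvCond1 D s1 s2 ((0 : Nat) : Int) (((j + 1) : Nat) : Int) = some false := by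
      simp [pvCond1]
    have hcond2 : pvCond2 D ((0 : Nat) : Int) (((j + 1) : Nat) : Int) = some false := by
      simp [pvCond2]
    obtain ⟨Rc, cc, hclec, hAc, hBc⟩ := ihj (by omega)
    refine pvFinish D s1 s2 0 (j + 1) 0 j "I"
      ["Insert " ++ (s2[j]).toString] Rc cc rfl ?_ ?_ ?_ (by omega) hAc hclec hBc
    · intro f ops
      simp only [pvALoop]
      split_ifs with hifc
      · rw [hcond1, hcond2]
        simp [hc2, hg2, ej]
      · omega
    · intro g stack out
      simp only [pvBMach]
      rw [if_pos trivial, if_neg hnz, hcond1, hcond2, ej]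
    · intro g stack out
      simp [pvBMach, hc2, hg2]

-- when str1 = str2 the walk follows the diagonal on equal characters and never reads D
theorem pvDiag (D : List (List Int)) (s1 : List Char) :
    ∀ (i : Nat), i ≤ s1.length →
    ∃ (R : List String) (c : Nat), c ≤ 2 * (i + i) + 1 ∧
      (∀ fA : Nat, i + i + 1 ≤ fA → ∀ ops,
        pvALoop D s1 s1 fA (i : Int) (i : Int) ops = R ++ ops.reverse) ∧
      (∀ (f : Nat) (stack : List (String × Int × Int)) (out : List String),
        pvBMach D s1 s1 (f + c) (("call", (i : Int), (i : Int)) :: stack) out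
          = pvBMach D s1 s1 f stack (out ++ R)) := by
  intro i
  induction i with
  | zero =>
    intro _
    exact pvZero D s1 s1
  | succ i ihi =>
    intro hi
    have hi1 : i < s1.length := by omega
    have ei : (((i + 1 : Nat)) : Int) - 1 = ((i : Nat) : Int) := by omega
    have hnz : ¬((((i + 1 : Nat)) : Int) = 0 ∧ (((i + 1 : Nat)) : Int) = 0) := by omega
    have hc1 : PySem.List.pyGet? s1 ((((i + 1) : Nat) : Int) - 1) = some s1[i] := by
      rw [ei, PySem.List.pyGet?_natCast, List.getElem?_eq_getElem hi1]
    have hg1 : s1[i]? = some s1[i] := List.getElem?_eq_getElem hi1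
    have hcond1 : pvCond1 D s1 s1 (((i + 1) : Nat) : Int) (((i + 1) : Nat) : Int) = some true := by
      simp [pvCond1, hc1, hg1]
    obtain ⟨Ra, ca, hclea, hAa, hBa⟩ := ihi (by omega)
    refine pvFinish D s1 s1 (i + 1) (i + 1) i i "R"
      [] Ra ca rfl ?_ ?_ ?_ (by omega) hAa (by omega) hBa
    · intro f ops
      simp only [pvALoop]
      split_ifs with hifc
      · rw [hcond1]
        simp [hc1, hg1, ei]
      · omega
    · intro g stack out
      simp only [pvBMach]
      rw [if_pos trivial, if_neg hnz, hcond1, ei]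
    · intro g stack out
      simp [pvBMach, hc1, hg1]

-- an empty stack with positive fuel halts with the accumulated output
theorem pvBMach_nil (D : List (List Int)) (s1 s2 : List Char) (f : Nat) (hf : 1 ≤ f)
    (out : List String) : pvBMach D s1 s2 f [] out = some out := by
  cases f with
  | zero => omega
  | succ f => simp [pvBMach]

-- ===== VERDICT (by name: the statement is the Claim_ definition above) =====
theorem reconstruct_operations_spec : Claim_equal_reconstruct_operations := by
  intro D str1 str2 _hDom hPre
  unfold Spec_reconstruct_operations reconstruct_operations reconstruct_operations_alt
  have h : ∃ (R : List String) (c : Nat),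
      c ≤ 2 * (str1.toList.length + str2.toList.length) + 1 ∧
      (∀ fA : Nat, str1.toList.length + str2.toList.length + 1 ≤ fA → ∀ ops,
        pvALoop D str1.toList str2.toList fA (str1.toList.length : Int) (str2.toList.length : Int) ops
          = R ++ ops.reverse) ∧
      (∀ (f : Nat) (stack : List (String × Int × Int)) (out : List String),
        pvBMach D str1.toList str2.toList (f + c)
          (("call", (str1.toList.length : Int), (str2.toList.length : Int)) :: stack) out
          = pvBMach D str1.toList str2.toList f stack (out ++ R)) := by
    rcases hPre with h0 | hEq | ⟨h1, h2, h3⟩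
    · have hm : str1.toList.length = 0 := by subst h0; rfl
      rw [hm]
      exact pvInsertOnly D str1.toList str2.toList _ (le_refl _)
    · have he : str2.toList = str1.toList := by rw [hEq]
      rw [he]
      exact pvDiag D str1.toList _ (le_refl _)
    · exact pvMain D _ _ h1 h2 h3 (str1.toList.length + str2.toList.length) _ _
        (le_refl _) (le_refl _) (le_refl _)
  obtain ⟨R, c, hc, hA, hB⟩ := h
  have hfA : str1.toList.length + str2.toList.length + 1 ≤
      str1.toList.length + 2 * str2.toList.length + 3 + D.foldl (fun a r => a + r.length) 0 := by
    omega
  have hsplit : 2 * (str1.toList.length + str2.toList.length) + 2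
      = (2 * (str1.toList.length + str2.toList.length) + 2 - c) + c := by omega
  rw [hA _ hfA, hsplit, hB, pvBMach_nil _ _ _ _ (by omega)]
  simp
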